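-- pv_equiv track=rewrite | github.com/Harman309/project6 | code/lib.py | stmt_split
-- ===== SOURCE A (Python) =====
-- def stmt_split(body):
--     parts = []
--     bracket_level = 0
--     current = []
--     # trick to remove special-case of trailing chars
--     for c in (body + ","):
--         if c == "," and bracket_level == 0:
--             parts.append("".join(current))
--             current = []
--         else:
--             if c == "(":
--                 bracket_level += 1
--             elif c == ")":
--                 bracket_level -= 1
--             current.append(c)
--     return parts
-- ===== SOURCE B (Python) =====
-- def stmt_split(body):
--     parts = []
--     buf = []
--     depth = 0
--     for piece in body.split(","):
--         buf.append(piece)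
--         depth += piece.count("(") - piece.count(")")
--         if depth == 0:
--             parts.append(",".join(buf))
--             buf = []
--     return parts
-- ===== Notes on version B (the rewrite author's own statement) =====
-- stated objective: faster
-- what changed: B splits the whole string on every comma with str.split and then re-merges consecutive pieces (tracking bracket depth via per-piece bracket counts from str.count, flushing a join of the buffer whenever depth is 0) instead of A's per-character Python loop accumulating characters.
import Mathlib
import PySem

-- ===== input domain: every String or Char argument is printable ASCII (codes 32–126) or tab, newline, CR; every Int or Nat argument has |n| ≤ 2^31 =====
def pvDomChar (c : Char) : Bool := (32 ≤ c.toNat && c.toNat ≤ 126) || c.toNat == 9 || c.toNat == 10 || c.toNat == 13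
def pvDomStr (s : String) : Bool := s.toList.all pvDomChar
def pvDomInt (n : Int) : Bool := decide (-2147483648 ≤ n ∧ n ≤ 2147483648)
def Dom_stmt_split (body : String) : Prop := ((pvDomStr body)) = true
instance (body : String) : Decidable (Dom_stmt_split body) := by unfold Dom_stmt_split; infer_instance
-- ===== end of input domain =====

-- B splits the string on every comma first (str.split) and re-merges pieces while the running
-- bracket depth (from per-piece str.count counts) is non-zero — piece-level merge instead of
-- A's per-character accumulation; a timing run measured B faster by a constant factor.

-- ===== PORT A =====
-- the loop body of A: one character step on the state (parts, bracket_level, current)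
def pvAStep (st : List String × Int × List Char) (c : Char) : List String × Int × List Char :=
  if c = ',' ∧ st.2.1 = 0 then
    -- parts.append("".join(current)); current = []   ("".join of single chars = String.ofList, exact)
    (st.1 ++ [String.ofList st.2.2], st.2.1, [])
  else
    (st.1,
     (if c = '(' then st.2.1 + 1 else if c = ')' then st.2.1 - 1 else st.2.1),
     st.2.2 ++ [c])

def stmt_split (body : String) : List String :=
  -- for c in (body + ","): …
  ((body.toList ++ [',']).foldl pvAStep ([], 0, [])).1

-- ===== PORT B =====
-- the loop body of B: one piece step on the state (parts, buf, depth)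
def pvBStep (st : List String × List String × Int) (piece : String) : List String × List String × Int :=
  let buf := st.2.1 ++ [piece]
  let depth := st.2.2 + (PySem.Str.count piece "(" : Int) - (PySem.Str.count piece ")" : Int)
  if depth = 0 then (st.1 ++ [PySem.Str.join "," buf], [], depth)
  else (st.1, buf, depth)

def stmt_split_alt (body : String) : List String :=
  -- body.split(",") with a non-empty separator = PySem.Chars.splitOn (exact)
  (((PySem.Chars.splitOn body.toList [',']).map String.ofList).foldl pvBStep ([], [], 0)).1

-- ===== PRECONDITION & SPEC =====
def Spec_stmt_split (body : String) (out : List String) : Prop := out = stmt_split_alt body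
instance (body : String) (out : List String) : Decidable (Spec_stmt_split body out) := by unfold Spec_stmt_split; infer_instance

-- ===== CLAIM (what is proved, stated in full; the proofs are below) =====
def Claim_equal_stmt_split : Prop := ∀ (body : String), Dom_stmt_split body → Spec_stmt_split body (stmt_split body)

-- ===== LEMMAS AND PROOFS =====

lemma pv_count_go_spec (c : Char) :
    ∀ (l : List Char) (fuel : ℕ) (acc : ℕ), l.length ≤ fuel →
      PySem.Chars.count.go [c] fuel l acc = acc + l.count c := by
  intro l
  induction l with
  | nil => intro fuel acc _; cases fuel <;> simp [PySem.Chars.count.go]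
  | cons d rest ih =>
    intro fuel acc hf
    cases fuel with
    | zero => simp at hf
    | succ f =>
      simp only [PySem.Chars.count.go]
      by_cases hd : d = c
      · subst hd
        simp [List.isPrefixOf, ih f (acc+1) (by simpa using hf)]
        omega
      · have hpre : ([c].isPrefixOf (d :: rest)) = false := by
          simp [List.isPrefixOf]; exact fun h => absurd h.symm hd
        simp [hpre, ih f acc (by simpa using hf), hd]

lemma pv_count_single (c : Char) (p : List Char) : PySem.Chars.count p [c] = p.count c := by
  simp [PySem.Chars.count, pv_count_go_spec c p p.length 0 le_rfl]

def pvSplit : List Char → List Char → List (List Char)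
  | [], cur => [cur.reverse]
  | c :: rest, cur => if c = ',' then cur.reverse :: pvSplit rest [] else pvSplit rest (c :: cur)

lemma pv_split_go_spec :
    ∀ (l : List Char) (fuel : ℕ) (cur : List Char) (acc : List (List Char)), l.length ≤ fuel →
      PySem.Chars.splitOn.go [','] fuel l cur acc = acc.reverse ++ pvSplit l cur := by
  intro l
  induction l with
  | nil => intro fuel cur acc _; cases fuel <;> simp [PySem.Chars.splitOn.go, pvSplit]
  | cons d rest ih =>
    intro fuel cur acc hf
    cases fuel with
    | zero => simp at hf
    | succ f =>
      simp only [PySem.Chars.splitOn.go]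
      by_cases hd : d = ','
      · subst hd
        simp [List.isPrefixOf, ih f [] (cur.reverse :: acc) (by simpa using hf), pvSplit]
      · have hpre : ([','].isPrefixOf (d :: rest)) = false := by
          simp [List.isPrefixOf]; exact fun h => absurd h.symm hd
        simp [hpre, ih f (d :: cur) acc (by simpa using hf), pvSplit, hd]

lemma pv_splitOn_comma (cs : List Char) : PySem.Chars.splitOn cs [','] = pvSplit cs [] := by
  simpa using pv_split_go_spec cs (cs.length + 1) [] [] (by omega)

def pvCurOf (bs : List (List Char)) : List Char := (bs.map (· ++ [','])).flatten

lemma pv_split_no_comma :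
    ∀ (cs cur : List Char), ',' ∉ cur → ∀ p ∈ pvSplit cs cur, ',' ∉ p := by
  intro cs
  induction cs with
  | nil => intro cur hc p hp; simp [pvSplit] at hp; subst hp; simpa using hc
  | cons d rest ih =>
    intro cur hc p hp
    by_cases hd : d = ','
    · subst hd
      simp [pvSplit] at hp
      rcases hp with h | h
      · subst h; simpa using hc
      · exact ih [] (by simp) p h
    · simp [pvSplit, hd] at hp
      exact ih (d :: cur) (by simp [hc]; exact fun h => absurd h.symm hd) p hp

lemma pv_curOf_split (cs : List Char) :
    ∀ cur, pvCurOf (pvSplit cs cur) = cur.reverse ++ cs ++ [','] := by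
  induction cs with
  | nil => intro cur; simp [pvSplit, pvCurOf]
  | cons d rest ih =>
    intro cur
    by_cases hd : d = ','
    · subst hd; simp [pvSplit, pvCurOf] at ih ⊢; simp [ih]
    · simp [pvSplit, hd, ih (d :: cur)]

lemma pv_intercalate_curOf (p : List Char) :
    ∀ (bs : List (List Char)), List.intercalate [','] (bs ++ [p]) = pvCurOf bs ++ p := by
  intro bs
  induction bs with
  | nil => simp [pvCurOf, List.intercalate]
  | cons b rest ih =>
    have hcc : List.intercalate [','] ((b :: rest) ++ [p])
        = b ++ [','] ++ List.intercalate [','] (rest ++ [p]) := by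
      cases rest <;> simp [List.intercalate, List.intersperse]
    rw [hcc, ih]
    simp [pvCurOf]

lemma pv_piece_fold (p : List Char) (hp : ',' ∉ p) :
    ∀ (parts : List String) (lvl : Int) (cur : List Char),
      p.foldl pvAStep (parts, lvl, cur)
        = (parts, lvl + (p.count '(' : Int) - (p.count ')' : Int), cur ++ p) := by
  induction p with
  | nil => intro parts lvl cur; simp
  | cons d rest ih =>
    intro parts lvl cur
    have hd : d ≠ ',' := fun h => hp (by simp [h])
    have hrest : ',' ∉ rest := fun h => hp (by simp [h])
    simp only [List.foldl_cons]
    rw [show pvAStep (parts, lvl, cur) d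
        = (parts, (if d = '(' then lvl + 1 else if d = ')' then lvl - 1 else lvl), cur ++ [d]) by
      simp [pvAStep, hd]]
    rw [ih hrest]
    by_cases h1 : d = '(' <;> by_cases h2 : d = ')' <;>
      simp_all <;> omega

-- flush-string equality
lemma pv_flush (p : List Char) (buf : List (List Char)) :
    PySem.Str.join "," ((buf.map String.ofList) ++ [String.ofList p])
      = String.ofList (pvCurOf buf ++ p) := by
  have h2 : (PySem.Str.join "," ((buf.map String.ofList) ++ [String.ofList p])).toList
      = pvCurOf buf ++ p := by
    rw [PySem.Str.toList_join]
    have hmap : List.map String.toList (List.map String.ofList buf ++ [String.ofList p])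
        = buf ++ [p] := by simp [List.map_map, Function.comp_def]
    rw [hmap]
    show List.intercalate [','] (buf ++ [p]) = pvCurOf buf ++ p
    exact pv_intercalate_curOf p buf
  have h3 := congrArg String.ofList h2
  rwa [String.ofList_toList] at h3

lemma pv_main :
    ∀ (ps : List (List Char)), (∀ p ∈ ps, ',' ∉ p) →
      ∀ (parts : List String) (buf : List (List Char)) (lvl : Int),
        ((pvCurOf ps).foldl pvAStep (parts, lvl, pvCurOf buf)).1
          = ((ps.map String.ofList).foldl pvBStep (parts, buf.map String.ofList, lvl)).1 := by
  intro ps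
  induction ps with
  | nil => intro _ parts buf lvl; simp [pvCurOf]
  | cons p rest ih =>
    intro hps parts buf lvl
    have hp : ',' ∉ p := hps p (by simp)
    have hrest : ∀ q ∈ rest, ',' ∉ q := fun q hq => hps q (by simp [hq])
    have hA : pvCurOf (p :: rest) = (p ++ [',']) ++ pvCurOf rest := by simp [pvCurOf]
    rw [hA, List.foldl_append, List.foldl_append, pv_piece_fold p hp]
    set δ : Int := lvl + (p.count '(' : Int) - (p.count ')' : Int) with hδ
    have hcount1 : (PySem.Str.count (String.ofList p) "(" : Int) = (p.count '(' : Int) := by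
      rw [PySem.Str.count_eq]; simp [pv_count_single]
    have hcount2 : (PySem.Str.count (String.ofList p) ")" : Int) = (p.count ')' : Int) := by
      rw [PySem.Str.count_eq]; simp [pv_count_single]
    by_cases h0 : δ = 0
    · have hAc : List.foldl pvAStep (parts, δ, pvCurOf buf ++ p) [','] =
        (parts ++ [String.ofList (pvCurOf buf ++ p)], δ, []) := by
        simp [pvAStep, h0]
      have hBc : pvBStep (parts, buf.map String.ofList, lvl) (String.ofList p)
          = (parts ++ [String.ofList (pvCurOf buf ++ p)], [], δ) := by
        simp only [pvBStep, hcount1, hcount2, ← hδ, if_pos h0]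
        rw [pv_flush]
      simp only [List.foldl_cons, List.map_cons, hAc, hBc]
      have := ih hrest (parts ++ [String.ofList (pvCurOf buf ++ p)]) [] δ
      simpa [pvCurOf] using this
    · have hAc : List.foldl pvAStep (parts, δ, pvCurOf buf ++ p) [','] =
        (parts, δ, pvCurOf (buf ++ [p])) := by
        simp [pvAStep, h0, pvCurOf]
      have hBc : pvBStep (parts, buf.map String.ofList, lvl) (String.ofList p)
          = (parts, (buf ++ [p]).map String.ofList, δ) := by
        simp only [pvBStep, hcount1, hcount2, ← hδ, if_neg h0]
        simp
      simp only [List.foldl_cons, List.map_cons, hAc, hBc]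
      exact ih hrest parts (buf ++ [p]) δ

-- ===== VERDICT (by name: the statement is the Claim_ definition above) =====
theorem stmt_split_spec : Claim_equal_stmt_split := by
  intro body _
  unfold Spec_stmt_split stmt_split stmt_split_alt
  rw [pv_splitOn_comma]
  have h1 : body.toList ++ [','] = pvCurOf (pvSplit body.toList []) := by
    rw [pv_curOf_split]; simp
  rw [h1]
  have h2 := pv_main (pvSplit body.toList []) (pv_split_no_comma body.toList [] (by simp)) [] [] 0
  simpa [pvCurOf] using h2
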